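-- pv_equiv track=rewrite | github.com/habubss/Cooldash | server/main4.py | check_two_texts
-- ===== SOURCE A (Python) =====
-- def compare(w1, w2):
--     if len(w1) != len(w2):
--         return 3
--     cnt = 0
--
--     for i in range(len(w1)):
--         if w1[i] != w2[i]:
--             cnt += 1
--
--     if cnt == 0:
--         return 0
--     elif cnt >= 2:
--         return 3
--
--     for i in range(len(w1)):
--         if w1[i] != w2[i]:
--             place = (i + 1) / len(w1)
--             if place <= 0.4:
--                 return 1
--             elif 0.4 < place < 0.6:
--                 return 3
--             elif place >= 0.6:
--                 return 2
--
-- def check_two_texts(s1, s2):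
--     words1 = s1
--     words2 = s2.split()
--     res = []
--     for i in range(len(words1)):
--         if i >= len(words2):
--             res.append(3)
--         else:
--             ans = compare(words1[i], words2[i])
--             res.append(ans)
--     return res
-- ===== SOURCE B (Python) =====
-- def compare(w1, w2):
--     if len(w1) != len(w2):
--         return 3
--     if w1 == w2:
--         return 0
--     i = 0
--     while w1[i] == w2[i]:
--         i += 1
--     j = len(w1) - 1
--     while w1[j] == w2[j]:
--         j -= 1
--     if i != j:
--         return 3
--     place = (i + 1) / len(w1)
--     if place <= 0.4:
--         return 1
--     if place < 0.6:
--         return 3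
--     return 2
--
-- def check_two_texts(s1, s2):
--     it = iter(s2.split())
--     res = []
--     for w1 in s1:
--         w2 = next(it, None)
--         res.append(3 if w2 is None else compare(w1, w2))
--     return res
-- ===== Notes on version B (the rewrite author's own statement) =====
-- stated objective: alternative
-- what changed: compare replaces A's count-all-mismatches-then-rescan with an equality test plus a bidirectional scan (first mismatch from the left, first from the right): equal ends mean exactly one mismatch, unequal ends mean >=2; check_two_texts iterates over the words themselves with an iterator over the second list instead of an index loop with bounds checks.
import Mathlib
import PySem

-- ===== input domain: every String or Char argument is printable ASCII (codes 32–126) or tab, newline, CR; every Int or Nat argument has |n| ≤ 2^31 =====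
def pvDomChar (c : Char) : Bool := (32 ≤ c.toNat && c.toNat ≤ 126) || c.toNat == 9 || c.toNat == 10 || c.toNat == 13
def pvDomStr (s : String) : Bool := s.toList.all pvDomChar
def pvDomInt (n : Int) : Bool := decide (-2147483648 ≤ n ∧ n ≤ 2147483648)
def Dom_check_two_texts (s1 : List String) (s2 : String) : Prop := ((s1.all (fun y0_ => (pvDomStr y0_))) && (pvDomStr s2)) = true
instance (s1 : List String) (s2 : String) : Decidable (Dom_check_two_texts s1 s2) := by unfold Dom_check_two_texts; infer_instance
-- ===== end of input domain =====

-- B: compare uses an equality test plus a bidirectional scan (first mismatch from the left, first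
-- from the right; equal positions = exactly one mismatch) instead of A's count-then-rescan, and
-- check_two_texts walks the word lists themselves instead of an index loop (objective: alternative).
-- Return value only; no mutation. Python's float comparisons 'place <= 0.4', 'place < 0.6' are
-- ported as exact integer comparisons 5*(i+1) ⋚ 2*n / 3*n: exact for word lengths up to 2^31, since
-- no fraction with such a denominator lies within float rounding distance of 2/5 or 3/5.

-- ===== PORT A =====
-- second loop of A's compare: scans from index i for the (single) mismatch and classifies its place
def compareA_loop2 (l1 l2 : List Char) (n : Int) (i : Nat) : Int :=
  if h : i < l1.length then
    if PySem.List.pyGetD l1 (i : Int) ' ' ≠ PySem.List.pyGetD l2 (i : Int) ' ' then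
      if 5 * ((i : Int) + 1) ≤ 2 * n then 1
      else if 2 * n < 5 * ((i : Int) + 1) ∧ 5 * ((i : Int) + 1) < 3 * n then 3
      else if 5 * ((i : Int) + 1) ≥ 3 * n then 2
      else compareA_loop2 l1 l2 n (i + 1)   -- Python: no elif fires, the loop continues (dead: the chain is exhaustive)
    else compareA_loop2 l1 l2 n (i + 1)
  else 0   -- Python falls off the loop returning None; unreachable: called only when exactly one mismatch exists
termination_by l1.length - i

def compareA (w1 w2 : String) : Int :=
  let l1 := w1.toList
  let l2 := w2.toList
  if l1.length ≠ l2.length then 3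
  else
    let n : Int := l1.length
    let cnt : Int := (PySem.List.pyRange 0 n 1).foldl
      (fun c i => if PySem.List.pyGetD l1 i ' ' ≠ PySem.List.pyGetD l2 i ' ' then c + 1 else c) 0
    if cnt = 0 then 0
    else if cnt ≥ 2 then 3
    else compareA_loop2 l1 l2 n 0

def check_two_texts (s1 : List String) (s2 : String) : List Int :=
  let words1 := s1
  let words2 := PySem.Str.split₀ s2
  (PySem.List.pyRange 0 (words1.length : Int) 1).foldl
    (fun res i =>
      if i ≥ (words2.length : Int) then res ++ [3]
      else res ++ [compareA (PySem.List.pyGetD words1 i "") (PySem.List.pyGetD words2 i "")]) []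

-- ===== PORT B =====
-- B's 'i = 0; while w1[i] == w2[i]: i += 1'
def firstDiffB (l1 l2 : List Char) (i : Nat) : Nat :=
  if _h : i < l1.length then
    if PySem.List.pyGetD l1 (i : Int) ' ' = PySem.List.pyGetD l2 (i : Int) ' ' then
      firstDiffB l1 l2 (i + 1)
    else i
  else i   -- Python would raise IndexError here; unreachable: a mismatch exists when called
termination_by l1.length - i

-- B's 'j = len(w1) - 1; while w1[j] == w2[j]: j -= 1'
def lastDiffB (l1 l2 : List Char) (j : Nat) : Nat :=
  if PySem.List.pyGetD l1 (j : Int) ' ' = PySem.List.pyGetD l2 (j : Int) ' ' then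
    if _h : j = 0 then 0   -- Python would go on to negative indices; unreachable: a mismatch exists when called
    else lastDiffB l1 l2 (j - 1)
  else j
termination_by j
decreasing_by omega

def compareB (w1 w2 : String) : Int :=
  let l1 := w1.toList
  let l2 := w2.toList
  if l1.length ≠ l2.length then 3
  else if l1 = l2 then 0
  else
    let n : Int := l1.length
    let i := firstDiffB l1 l2 0
    let j := lastDiffB l1 l2 (l1.length - 1)
    if i ≠ j then 3
    else if 5 * ((i : Int) + 1) ≤ 2 * n then 1
    else if 5 * ((i : Int) + 1) < 3 * n then 3
    else 2

-- B's for-loop over s1 with an iterator over words2: recursion consuming both lists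
def goB : List String → List String → List Int
  | [], _ => []
  | _ :: t, [] => 3 :: goB t []
  | a :: t, b :: t2 => compareB a b :: goB t t2

def check_two_texts_alt (s1 : List String) (s2 : String) : List Int :=
  goB s1 (PySem.Str.split₀ s2)

-- ===== PRECONDITION & SPEC =====
def Spec_check_two_texts (s1 : List String) (s2 : String) (out : List Int) : Prop := out = check_two_texts_alt s1 s2
instance (s1 : List String) (s2 : String) (out : List Int) : Decidable (Spec_check_two_texts s1 s2 out) := by unfold Spec_check_two_texts; infer_instance

-- ===== CLAIM (what is proved, stated in full; the proofs are below) =====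
def Claim_equal_check_two_texts : Prop := ∀ (s1 : List String) (s2 : String), Dom_check_two_texts s1 s2 → Spec_check_two_texts s1 s2 (check_two_texts s1 s2)

-- ===== LEMMAS AND PROOFS =====

-- the list of mismatch indices (used only by the proofs, to characterise both programs)
def diffsOf (xs : List (Char × Char)) (s : Int) : List Int :=
  ((PySem.List.enumerate xs s).filter (fun p => p.2.1 ≠ p.2.2)).map (·.1)

theorem diffsOf_cons (p : Char × Char) (xs : List (Char × Char)) (s : Int) :
    diffsOf (p :: xs) s = (if p.1 ≠ p.2 then [s] else []) ++ diffsOf xs (s + 1) := by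
  simp only [diffsOf, PySem.List.enumerate_cons, List.filter_cons]
  split <;> simp_all

theorem diffsOf_append (xs ys : List (Char × Char)) (s : Int) :
    diffsOf (xs ++ ys) s = diffsOf xs s ++ diffsOf ys (s + xs.length) := by
  induction xs generalizing s with
  | nil => simp [diffsOf]
  | cons p xs ih =>
    simp only [List.cons_append, diffsOf_cons, ih, List.append_assoc, List.length_cons]
    have h1 : ((xs.length + 1 : Nat) : Int) = (xs.length : Int) + 1 := by push_cast; ring
    have h2 : s + 1 + (xs.length : Int) = s + ((xs.length : Int) + 1) := by ring
    rw [h1, h2]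

theorem diffsOf_length (xs : List (Char × Char)) (s : Int) :
    (diffsOf xs s).length = xs.countP (fun p => p.1 ≠ p.2) := by
  induction xs generalizing s with
  | nil => rfl
  | cons p xs ih =>
    rw [diffsOf_cons, List.countP_cons]
    simp only [List.length_append, ih]
    split
    · simp_all; omega
    · simp_all

theorem mem_diffsOf_ge (xs : List (Char × Char)) (s : Int) (k : Int) (hk : k ∈ diffsOf xs s) :
    s ≤ k := by
  induction xs generalizing s with
  | nil => simp [diffsOf] at hk
  | cons p xs ih =>
    rw [diffsOf_cons] at hk
    rcases List.mem_append.1 hk with h | h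
    · split at h <;> simp_all
    · have := ih (s + 1) h; omega

theorem diffsOf_head_lt_rest (xs : List (Char × Char)) (s j : Int) (rest : List Int)
    (h : diffsOf xs s = j :: rest) : ∀ k ∈ rest, j < k := by
  induction xs generalizing s with
  | nil => simp [diffsOf] at h
  | cons p xs ih =>
    rw [diffsOf_cons] at h
    split at h
    · simp only [List.singleton_append, List.cons.injEq] at h
      intro k hk
      have : k ∈ diffsOf xs (s + 1) := by rw [← h.2] at hk; exact hk
      have := mem_diffsOf_ge xs (s + 1) k this
      omega
    · simp only [List.nil_append] at h
      exact ih (s + 1) h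

theorem foldl_count_pairs (xs : List (Char × Char)) (c0 : Int) :
    xs.foldl (fun c p => if p.1 ≠ p.2 then c + 1 else c) c0
      = c0 + (xs.countP (fun p => p.1 ≠ p.2) : Int) := by
  induction xs generalizing c0 with
  | nil => simp
  | cons p xs ih =>
    simp only [List.foldl_cons, List.countP_cons, ih]
    split
    · simp_all; omega
    · simp_all

theorem cnt_eq_countP (l1 l2 : List Char) (h : l1.length = l2.length) :
    (PySem.List.pyRange 0 (l1.length : Int) 1).foldl
      (fun c i => if PySem.List.pyGetD l1 i ' ' ≠ PySem.List.pyGetD l2 i ' ' then c + 1 else c) (0 : Int)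
    = ((l1.zip l2).countP (fun p => p.1 ≠ p.2) : Int) := by
  have hzlen : (l1.zip l2).length = l1.length := by simp [List.length_zip, h]
  have hcongr :
      (PySem.List.pyRange 0 (l1.length : Int) 1).foldl
        (fun c i => if PySem.List.pyGetD l1 i ' ' ≠ PySem.List.pyGetD l2 i ' ' then c + 1 else c) (0 : Int)
      = (PySem.List.pyRange 0 (((l1.zip l2).length : Nat) : Int) 1).foldl
        (fun c i => (fun (c : Int) (p : Char × Char) => if p.1 ≠ p.2 then c + 1 else c) c
          (PySem.List.pyGetD (l1.zip l2) i (' ', ' '))) (0 : Int) := by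
    rw [hzlen]
    apply PySem.List.foldl_congr_mem
    intro acc i hi
    obtain ⟨h0, h1⟩ := (PySem.List.mem_pyRange_one).1 hi
    rw [PySem.List.pyGetD_eq_getElem l1 ' ' h0 (by simpa using h1),
        PySem.List.pyGetD_eq_getElem l2 ' ' h0 (by omega),
        PySem.List.pyGetD_eq_getElem (l1.zip l2) (' ', ' ') h0 (by omega),
        List.getElem_zip]
  rw [hcongr]
  rw [PySem.List.foldl_pyRange_zero_pyGetD' (l1.zip l2) (' ', ' ')
      (fun (c : Int) (p : Char × Char) => if p.1 ≠ p.2 then c + 1 else c) (0 : Int)]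
  rw [foldl_count_pairs]
  simp

theorem countP_zero_iff_eq (l1 l2 : List Char) (h : l1.length = l2.length) :
    (l1.zip l2).countP (fun p => p.1 ≠ p.2) = 0 ↔ l1 = l2 := by
  induction l1 generalizing l2 with
  | nil => cases l2 <;> simp_all
  | cons a t1 ih =>
    cases l2 with
    | nil => simp at h
    | cons b t2 =>
      have h' : t1.length = t2.length := by simpa using h
      by_cases hab : a = b
      · subst hab
        rw [List.zip_cons_cons, List.countP_cons]
        have hdec : (decide (((a, a).1 : Char) ≠ (a, a).2)) = false := by simp
        rw [hdec, if_neg (by simp), add_zero, ih t2 h']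
        simp
      · rw [List.zip_cons_cons, List.countP_cons]
        have hdec : (decide (((a, b).1 : Char) ≠ (a, b).2)) = true := by simp [hab]
        rw [hdec, if_pos rfl]
        simp [hab]

theorem getLastD_mem_self (l : List Int) (d : Int) (h : l ≠ []) : l.getLastD d ∈ l := by
  induction l generalizing d with
  | nil => simp at h
  | cons a t ih =>
    cases t with
    | nil => simp
    | cons b t' =>
      have hm := ih a (by simp)
      rw [List.getLastD_cons]
      exact List.mem_cons_of_mem _ hm

-- A's second loop equals the classification of the first remaining mismatch index
theorem loop2_eq (l1 l2 : List Char) (n : Int) (i : Nat) (h : l1.length = l2.length) :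
    compareA_loop2 l1 l2 n i =
      (match diffsOf ((l1.zip l2).drop i) (i : Int) with
       | [] => 0
       | j :: _ =>
         if 5 * (j + 1) ≤ 2 * n then 1
         else if 2 * n < 5 * (j + 1) ∧ 5 * (j + 1) < 3 * n then 3
         else if 5 * (j + 1) ≥ 3 * n then 2
         else 0) := by
  have hzlen : (l1.zip l2).length = l1.length := by simp [List.length_zip, h]
  induction hfu : l1.length - i generalizing i with
  | zero =>
    have hge : ¬ i < l1.length := by omega
    rw [compareA_loop2, dif_neg hge]
    rw [List.drop_eq_nil_of_le (by omega)]
    rfl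
  | succ k ih =>
    have hlt : i < l1.length := by omega
    have hltz : i < (l1.zip l2).length := by omega
    rw [compareA_loop2, dif_pos hlt]
    rw [List.drop_eq_getElem_cons hltz, diffsOf_cons, List.getElem_zip]
    rw [PySem.List.pyGetD_eq_getElem l1 ' ' (Int.natCast_nonneg i) (by simpa using hlt),
        PySem.List.pyGetD_eq_getElem l2 ' ' (Int.natCast_nonneg i) (by simp; omega)]
    simp only [Int.toNat_natCast]
    by_cases hd : l1[i] = l2[i]
    · rw [if_neg (by simpa using hd), if_neg (by simp [hd]), List.nil_append]
      rw [ih (i + 1) (by omega)]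
      have hc : ((i : Int) + 1) = (((i + 1 : Nat)) : Int) := by push_cast; ring
      rw [hc]
    · rw [if_pos (c := l1[i] ≠ l2[i]) hd, if_pos (c := (l1[i], l2[i]).1 ≠ (l1[i], l2[i]).2) hd]
      simp only [List.singleton_append]
      split_ifs <;> first | rfl | omega

-- B's left scan finds the head of the remaining mismatch list
theorem firstDiffB_eq (l1 l2 : List Char) (h : l1.length = l2.length) (i : Nat)
    (j : Int) (rest : List Int)
    (hd : diffsOf ((l1.zip l2).drop i) (i : Int) = j :: rest) :
    firstDiffB l1 l2 i = j.toNat := by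
  have hzlen : (l1.zip l2).length = l1.length := by simp [List.length_zip, h]
  induction hfu : l1.length - i generalizing i j rest with
  | zero =>
    rw [List.drop_eq_nil_of_le (by omega)] at hd
    simp [diffsOf] at hd
  | succ k ih =>
    have hlt : i < l1.length := by omega
    have hltz : i < (l1.zip l2).length := by omega
    rw [List.drop_eq_getElem_cons hltz, diffsOf_cons, List.getElem_zip] at hd
    rw [firstDiffB, dif_pos hlt]
    rw [PySem.List.pyGetD_eq_getElem l1 ' ' (Int.natCast_nonneg i) (by simpa using hlt),
        PySem.List.pyGetD_eq_getElem l2 ' ' (Int.natCast_nonneg i) (by simp; omega)]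
    simp only [Int.toNat_natCast]
    by_cases he : l1[i] = l2[i]
    · rw [if_pos he]
      rw [if_neg (by simp [he]), List.nil_append] at hd
      have hc : ((i : Int) + 1) = (((i + 1 : Nat)) : Int) := by push_cast; ring
      rw [hc] at hd
      exact ih (i + 1) j rest hd (by omega)
    · rw [if_neg he]
      rw [if_pos (by simp [he]), List.singleton_append] at hd
      have : j = (i : Int) := (List.cons.injEq .. ▸ hd).1.symm
      simp [this]

-- B's right scan finds the last of the mismatch list of the prefix
theorem lastDiffB_eq (l1 l2 : List Char) (h : l1.length = l2.length) (j : Nat)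
    (hj : j < l1.length)
    (hne : diffsOf ((l1.zip l2).take (j + 1)) 0 ≠ []) :
    lastDiffB l1 l2 j = ((diffsOf ((l1.zip l2).take (j + 1)) 0).getLastD 0).toNat := by
  have hzlen : (l1.zip l2).length = l1.length := by simp [List.length_zip, h]
  induction j with
  | zero =>
    cases l1 with
    | nil => simp at hj
    | cons a t1 =>
      cases l2 with
      | nil => simp at h
      | cons b t2 =>
        have htake : (((a :: t1).zip (b :: t2)).take (0 + 1)) = [(a, b)] := rfl
        rw [htake] at hne ⊢
        rw [lastDiffB]
        have hg1 : PySem.List.pyGetD (a :: t1) ((0 : Nat) : Int) ' ' = a := by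
          rw [PySem.List.pyGetD_natCast]; rfl
        have hg2 : PySem.List.pyGetD (b :: t2) ((0 : Nat) : Int) ' ' = b := by
          rw [PySem.List.pyGetD_natCast]; rfl
        rw [hg1, hg2]
        by_cases he : a = b
        · exact absurd (by simp [diffsOf, PySem.List.enumerate, he]) hne
        · rw [if_neg he]
          simp [diffsOf, PySem.List.enumerate, he]
  | succ k ih =>
    have hkz : k + 1 < (l1.zip l2).length := by omega
    have htake : (l1.zip l2).take (k + 1 + 1) = (l1.zip l2).take (k + 1) ++ [(l1.zip l2)[k + 1]] := by
      rw [List.take_succ, List.getElem?_eq_getElem hkz]; rfl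
    have hlen : (0 : Int) + (((l1.zip l2).take (k + 1)).length : Int) = ((k + 1 : Nat) : Int) := by
      simp [List.length_take]; omega
    rw [htake, diffsOf_append, hlen, List.getElem_zip] at hne ⊢
    rw [lastDiffB]
    rw [PySem.List.pyGetD_eq_getElem l1 ' ' (Int.natCast_nonneg _) (by push_cast; omega),
        PySem.List.pyGetD_eq_getElem l2 ' ' (Int.natCast_nonneg _) (by push_cast; omega)]
    simp only [Int.toNat_natCast]
    by_cases he : l1[k + 1] = l2[k + 1]
    · rw [if_pos he]
      rw [dif_neg (by omega)]
      have hnil : diffsOf [(l1[k + 1], l2[k + 1])] ((k + 1 : Nat) : Int) = [] := by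
        simp [diffsOf, PySem.List.enumerate, he]
      rw [hnil, List.append_nil] at hne ⊢
      have hk1 : k + 1 - 1 = k := by omega
      rw [hk1]
      exact ih (by omega) hne
    · rw [if_neg he]
      have hone : diffsOf [(l1[k + 1], l2[k + 1])] ((k + 1 : Nat) : Int) = [((k + 1 : Nat) : Int)] := by
        simp [diffsOf, PySem.List.enumerate, he]
      rw [hone, List.getLastD_concat]
      simp

theorem compare_eq (w1 w2 : String) : compareA w1 w2 = compareB w1 w2 := by
  unfold compareA compareB
  by_cases hl : w1.toList.length = w2.toList.length
  case neg => rw [if_pos hl, if_pos hl]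
  case pos =>
    rw [if_neg (show ¬(w1.toList.length ≠ w2.toList.length) from by omega),
        if_neg (show ¬(w1.toList.length ≠ w2.toList.length) from by omega)]
    simp only []
    rw [cnt_eq_countP _ _ hl]
    have hdl := diffsOf_length (w1.toList.zip w2.toList) 0
    have hzlen : (w1.toList.zip w2.toList).length = w1.toList.length := by
      simp [List.length_zip, hl]
    rcases hds : diffsOf (w1.toList.zip w2.toList) 0 with _ | ⟨j, rest⟩
    · have hc0 : (w1.toList.zip w2.toList).countP (fun p => p.1 ≠ p.2) = 0 := by
        rw [← hdl, hds]; rfl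
      have heq : w1.toList = w2.toList := (countP_zero_iff_eq _ _ hl).1 hc0
      have hcI : (((w1.toList.zip w2.toList).countP (fun p => p.1 ≠ p.2) : Nat) : Int) = 0 := by
        exact_mod_cast hc0
      rw [hcI, if_pos rfl, if_pos heq]
    · have hcpos : (w1.toList.zip w2.toList).countP (fun p => p.1 ≠ p.2) ≠ 0 := by
        rw [← hdl, hds]; simp
      have hne12 : w1.toList ≠ w2.toList := fun he => hcpos ((countP_zero_iff_eq _ _ hl).2 he)
      rw [if_neg hne12]
      have hj0 : 0 ≤ j := mem_diffsOf_ge _ 0 j (by rw [hds]; simp)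
      have hfirst : firstDiffB w1.toList w2.toList 0 = j.toNat :=
        firstDiffB_eq _ _ hl 0 j rest (by simpa using hds)
      have hn1 : 1 ≤ w1.toList.length := by
        rcases hw : w1.toList with _ | ⟨a, t⟩
        · exfalso
          apply hne12
          have h2 : w2.toList.length = 0 := by rw [← hl, hw]; rfl
          rw [hw, List.eq_nil_of_length_eq_zero h2]
        · simp
      have htake : (w1.toList.zip w2.toList).take ((w1.toList.length - 1) + 1)
          = w1.toList.zip w2.toList := by
        rw [show (w1.toList.length - 1) + 1 = w1.toList.length by omega]
        exact List.take_of_length_le (by omega)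
      have hlast : lastDiffB w1.toList w2.toList (w1.toList.length - 1)
          = ((diffsOf (w1.toList.zip w2.toList) 0).getLastD 0).toNat := by
        have hh := lastDiffB_eq _ _ hl (w1.toList.length - 1) (by omega)
          (by rw [htake, hds]; simp)
        rw [htake] at hh
        exact hh
      rcases rest with _ | ⟨j2, rest2⟩
      · -- exactly one mismatch
        have hc1 : (w1.toList.zip w2.toList).countP (fun p => p.1 ≠ p.2) = 1 := by
          rw [← hdl, hds]; rfl
        have hcI : (((w1.toList.zip w2.toList).countP (fun p => p.1 ≠ p.2) : Nat) : Int) = 1 := by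
          exact_mod_cast hc1
        rw [hcI, if_neg (by norm_num), if_neg (by norm_num)]
        rw [loop2_eq _ _ _ 0 hl]
        simp only [List.drop_zero, Nat.cast_zero, hds]
        rw [hfirst, hlast, hds]
        have hgl : ([j] : List Int).getLastD 0 = j := rfl
        rw [hgl]
        rw [if_neg (show ¬(j.toNat ≠ j.toNat) from by simp)]
        have hjc : ((j.toNat : Int)) = j := Int.toNat_of_nonneg hj0
        rw [hjc]
        split_ifs <;> first | rfl | omega
      · -- at least two mismatches
        have hc2 : 2 ≤ (w1.toList.zip w2.toList).countP (fun p => p.1 ≠ p.2) := by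
          rw [← hdl, hds]; simp
        have hcI2 : (((w1.toList.zip w2.toList).countP (fun p => p.1 ≠ p.2) : Nat) : Int) ≥ 2 := by
          exact_mod_cast hc2
        rw [if_neg (by omega), if_pos hcI2]
        have hk := getLastD_mem_self (j2 :: rest2) j (by simp)
        have hlt : j < (j2 :: rest2).getLastD j :=
          diffsOf_head_lt_rest _ _ _ _ hds _ hk
        rw [hfirst, hlast, hds, List.getLastD_cons]
        rw [if_pos (show j.toNat ≠ ((j2 :: rest2).getLastD j).toNat from by omega)]

-- generic recursion over both word lists (proof-side mirror of goB)
def goG (f : String → String → Int) : List String → List String → List Int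
  | [], _ => []
  | _ :: t, [] => 3 :: goG f t []
  | a :: t, b :: t2 => f a b :: goG f t t2

theorem goG_nil (f : String → String → Int) (l : List String) :
    goG f l [] = List.replicate l.length 3 := by
  induction l with
  | nil => rfl
  | cons a t ih => simp [goG, ih, List.replicate_succ]

-- outer structure: index loop with bounds check = recursion over both lists
theorem outer_eq (f : String → String → Int) (l1 l2 : List String) :
    (List.range l1.length).map
      (fun (k : Nat) => if (k : Int) ≥ (l2.length : Int) then 3
                else f (PySem.List.pyGetD l1 (k : Int) "") (PySem.List.pyGetD l2 (k : Int) ""))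
    = goG f l1 l2 := by
  induction l1 generalizing l2 with
  | nil => simp [goG]
  | cons a l1 ih =>
    cases l2 with
    | nil =>
      rw [List.map_congr_left (g := fun _ => (3 : Int))
        (fun k _ => by rw [if_pos (by simp)])]
      rw [goG_nil]
      simp [List.map_const']
    | cons b l2 =>
      rw [show (a :: l1).length = l1.length + 1 from rfl,
          List.range_succ_eq_map, List.map_cons, List.map_map]
      rw [if_neg (by simp)]
      have htail :
          (List.range l1.length).map
            ((fun (k : Nat) => if (k : Int) ≥ (((b :: l2).length : Nat) : Int) then 3
                else f (PySem.List.pyGetD (a :: l1) (k : Int) "") (PySem.List.pyGetD (b :: l2) (k : Int) "")) ∘ Nat.succ)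
          = (List.range l1.length).map
            (fun (k : Nat) => if (k : Int) ≥ ((l2.length : Int)) then 3
                else f (PySem.List.pyGetD l1 (k : Int) "") (PySem.List.pyGetD l2 (k : Int) "")) := by
        apply List.map_congr_left
        intro k _
        simp only [Function.comp_apply]
        have hcond : ((Nat.succ k : Nat) : Int) ≥ (((b :: l2).length : Nat) : Int) ↔ (k : Int) ≥ ((l2.length : Int)) := by
          simp only [List.length_cons]; push_cast; omega
        have hg1 : PySem.List.pyGetD (a :: l1) ((Nat.succ k : Nat) : Int) "" = PySem.List.pyGetD l1 (k : Int) "" := by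
          rw [PySem.List.pyGetD_natCast, PySem.List.pyGetD_natCast]; rfl
        have hg2 : PySem.List.pyGetD (b :: l2) ((Nat.succ k : Nat) : Int) "" = PySem.List.pyGetD l2 (k : Int) "" := by
          rw [PySem.List.pyGetD_natCast, PySem.List.pyGetD_natCast]; rfl
        rw [hg1, hg2]
        by_cases hc : (k : Int) ≥ ((l2.length : Int))
        · rw [if_pos (hcond.2 hc), if_pos hc]
        · rw [if_neg (fun hx => hc (hcond.1 hx)), if_neg hc]
      rw [htail, ih]
      simp [goG]

theorem goG_congr (f g : String → String → Int) (hfg : ∀ a b, f a b = g a b)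
    (l1 l2 : List String) : goG f l1 l2 = goG g l1 l2 := by
  induction l1 generalizing l2 with
  | nil => rfl
  | cons a t ih => cases l2 <;> simp [goG, hfg, ih]

theorem goG_compareB (l1 l2 : List String) : goG compareB l1 l2 = goB l1 l2 := by
  induction l1 generalizing l2 with
  | nil => rfl
  | cons a t ih => cases l2 <;> simp [goG, goB, ih]

-- ===== VERDICT (by name: the statement is the Claim_ definition above) =====
theorem check_two_texts_spec : Claim_equal_check_two_texts := by
  intro s1 s2 _
  show check_two_texts s1 s2 = check_two_texts_alt s1 s2
  unfold check_two_texts check_two_texts_alt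
  simp only []
  set w2 := PySem.Str.split₀ s2 with hw2
  have hbody : (fun (res : List Int) (i : Int) =>
      if i ≥ (w2.length : Int) then res ++ [3]
      else res ++ [compareA (PySem.List.pyGetD s1 i "") (PySem.List.pyGetD w2 i "")])
    = (fun res i => res ++ [if i ≥ (w2.length : Int) then 3
        else compareA (PySem.List.pyGetD s1 i "") (PySem.List.pyGetD w2 i "")]) := by
    funext res i; split <;> rfl
  rw [hbody, PySem.List.foldl_append_singleton_eq_map, List.nil_append]
  rw [PySem.List.pyRange_zero_natCast, List.map_map]
  have hcomp : ((fun i => if i ≥ (w2.length : Int) then (3 : Int)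
        else compareA (PySem.List.pyGetD s1 i "") (PySem.List.pyGetD w2 i "")) ∘ fun (k : Nat) => (k : Int))
      = (fun (k : Nat) => if (k : Int) ≥ (w2.length : Int) then (3 : Int)
        else compareA (PySem.List.pyGetD s1 (k : Int) "") (PySem.List.pyGetD w2 (k : Int) "")) := rfl
  rw [hcomp, outer_eq compareA s1 w2]
  rw [goG_congr compareA compareB compare_eq, goG_compareB]
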